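-- pv_equiv track=rewrite | github.com/JonathanShabtai/coding_problems | leetcode/number_complement.py | findComplement_str
-- ===== SOURCE A (Python) =====
-- def findComplement_str(num):
--     num_binary = bin(num)
--     ans = ''
--     for i in num_binary[2:]:
--         if i == '0':
--             ans += '1'
--         else:
--             ans += '0'
--     return int(ans, 2)
-- ===== SOURCE B (Python) =====
-- def findComplement_str(num):
--     width = max(num.bit_length(), 1)
--     return num ^ ((1 << width) - 1)
-- ===== Notes on version B (the rewrite author's own statement) =====
-- stated objective: idiomatic
-- what changed: Replaced the binary-string building loop and base-2 reparse with a single XOR against the all-ones mask of num's bit width (closed form, no string).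
-- outside the precondition, e.g. on findComplement_str(-5): A returns 2, B returns -4
import Mathlib
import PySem

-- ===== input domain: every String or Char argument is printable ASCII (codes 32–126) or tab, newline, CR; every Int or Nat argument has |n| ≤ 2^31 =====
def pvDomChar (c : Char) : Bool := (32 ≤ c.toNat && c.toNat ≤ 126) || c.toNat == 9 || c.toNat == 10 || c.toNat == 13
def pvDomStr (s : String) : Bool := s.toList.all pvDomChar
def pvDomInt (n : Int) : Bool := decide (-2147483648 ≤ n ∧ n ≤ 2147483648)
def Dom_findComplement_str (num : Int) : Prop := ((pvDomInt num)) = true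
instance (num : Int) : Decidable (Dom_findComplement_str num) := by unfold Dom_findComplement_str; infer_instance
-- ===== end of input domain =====

-- B replaces A's binary-string building loop with a single XOR against the all-ones
-- mask of num's bit width (idiomatic closed form); equivalence proved for num ≥ 0.


-- ===== PORT A =====
-- digits of n in binary, most significant first (empty for 0); mirrors what bin() prints
def binDigits : Nat → List Char
  | 0 => []
  | n+1 => binDigits ((n+1)/2) ++ [if (n+1) % 2 = 1 then '1' else '0']
decreasing_by exact Nat.div_lt_self (Nat.succ_pos n) (by omega)

-- bin(num) as a list of characters ("0b…" / "-0b…"; bin(0) = "0b0")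
def pyBin (num : Int) : List Char :=
  (if num < 0 then ['-','0','b'] else ['0','b']) ++
    (if num = 0 then ['0'] else binDigits num.natAbs)

def findComplement_str (num : Int) : Int :=
  let num_binary := pyBin num
  -- for i in num_binary[2:]: ans += '1' if i == '0' else '0'
  let ans := (num_binary.drop 2).foldl
    (fun acc c => acc ++ [if c = '0' then '1' else '0']) ([] : List Char)
  -- int(ans, 2): ans consists only of '0'/'1' here, so plain base-2 accumulation is exact
  ans.foldl (fun a c => 2*a + (if c = '1' then 1 else 0)) (0 : Int)

-- ===== PORT B =====
-- num.bit_length() for a natural number (Python's builtin, ported as this recursion)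
def pyBitLength : Nat → Nat
  | 0 => 0
  | n+1 => pyBitLength ((n+1)/2) + 1
decreasing_by exact Nat.div_lt_self (Nat.succ_pos n) (by omega)

-- Int.xor is Python's ^ on int (two's-complement bitwise xor)
def findComplement_str_alt (num : Int) : Int :=
  let width : Nat := max (pyBitLength num.natAbs) 1
  Int.xor num (((1:Int) <<< width) - 1)

-- ===== PRECONDITION & SPEC =====
-- Pre_ restricts to the task's natural domain (nonnegative input): on negative num
-- A complements the digits of "b<bits of |num|>", an artefact of slicing bin()'s
-- "-0b" prefix, which is outside the number-complement task's domain.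
def Pre_findComplement_str (num : Int) : Prop := 0 ≤ num
instance (num : Int) : Decidable (Pre_findComplement_str num) := by unfold Pre_findComplement_str; infer_instance
def pvWitness_findComplement_str : Int := (5)
def Spec_findComplement_str (num : Int) (out : Int) : Prop := out = findComplement_str_alt num
instance (num : Int) (out : Int) : Decidable (Spec_findComplement_str num out) := by unfold Spec_findComplement_str; infer_instance

-- ===== CLAIM (what is proved, stated in full; the proofs are below) =====
def Claim_equal_findComplement_str : Prop := ∀ (num : Int), Dom_findComplement_str num → Pre_findComplement_str num → Spec_findComplement_str num (findComplement_str num)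

-- ===== LEMMAS AND PROOFS =====

-- the ans-building foldl is an append-map
lemma foldl_append_map (f : Char → Char) (l : List Char) (acc : List Char) :
    l.foldl (fun acc c => acc ++ [f c]) acc = acc ++ l.map f := by
  induction l generalizing acc with
  | nil => simp
  | cons c t ih => simp [List.foldl, ih]

lemma pyBitLength_pos (n : Nat) : 0 < n → 1 ≤ pyBitLength n := by
  cases n with
  | zero => omega
  | succ m => intro _; rw [pyBitLength]; omega

lemma lt_two_pow_pyBitLength (n : Nat) : n < 2 ^ pyBitLength n := by
  induction n using Nat.strong_induction_on with
  | _ n ih =>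
    match n with
    | 0 => simp [pyBitLength]
    | m+1 =>
      have h := ih ((m+1)/2) (Nat.div_lt_self (Nat.succ_pos m) (by omega))
      rw [pyBitLength, pow_succ]
      omega

-- the complemented digit fold, in one go: value = acc·2^width + (2^width − 1 − n)
lemma fold_compl_binDigits (n : Nat) (a : Int) :
    ((binDigits n).map (fun c => if c = '0' then '1' else '0')).foldl
        (fun a c => 2*a + (if c = '1' then 1 else 0)) a
      = a * 2 ^ pyBitLength n + (2 ^ pyBitLength n - 1 - (n : Int)) := by
  induction n using Nat.strong_induction_on generalizing a with
  | _ n ih =>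
    match n with
    | 0 => simp [binDigits, pyBitLength]
    | m+1 =>
      have hd := ih ((m+1)/2) (Nat.div_lt_self (Nat.succ_pos m) (by omega))
      rw [binDigits, pyBitLength]
      rw [List.map_append, List.foldl_append, hd]
      rw [pow_succ]
      have hsplit : (m+1) = 2 * ((m+1)/2) + (m+1) % 2 := by omega
      have hcast : ((m+1 : Nat) : Int)
          = 2 * (((m+1)/2 : Nat) : Int) + (((m+1) % 2 : Nat) : Int) := by
        exact_mod_cast congrArg (fun k : Nat => (k : Int)) hsplit
      rcases Nat.mod_two_eq_zero_or_one (m+1) with h0 | h0 <;>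
        · simp only [h0] at hcast ⊢
          simp
          linarith [hcast]

-- XOR with the all-ones mask is subtraction from it (Nat, n below the mask)
lemma xor_ones (k : Nat) : ∀ n : Nat, n < 2 ^ k → n ^^^ (2 ^ k - 1) = 2 ^ k - 1 - n := by
  induction k with
  | zero => intro n h; interval_cases n; decide
  | succ k ih =>
    intro n h
    set m := n ^^^ (2 ^ (k+1) - 1) with hm
    have hdiv : m / 2 = 2 ^ k - 1 - n / 2 := by
      have h1 : m / 2 = n / 2 ^^^ ((2 ^ (k+1) - 1) / 2) := Nat.xor_div_two
      have h2 : (2 ^ (k+1) - 1) / 2 = 2 ^ k - 1 := by rw [pow_succ]; omega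
      rw [h1, h2]
      exact ih (n/2) (by rw [pow_succ] at h; omega)
    have hmod : m % 2 = (n + (2 ^ (k+1) - 1)) % 2 := Nat.xor_mod_two_eq
    have hp : (2:Nat) ^ (k+1) = 2 * 2 ^ k := by rw [pow_succ]; ring
    have hpos : 0 < 2 ^ k := Nat.two_pow_pos k
    omega

lemma pyBitLength_zero : pyBitLength 0 = 0 := by rw [pyBitLength]

lemma int_shiftLeft_one (w : Nat) : ((1:Int) <<< w) = 2 ^ w := by
  rw [Int.shiftLeft_eq]; ring

-- ===== VERDICT (by name: the statement is the Claim_ definition above) =====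
theorem findComplement_str_spec : Claim_equal_findComplement_str := by
  intro num _ hpre
  unfold Spec_findComplement_str
  rcases Int.eq_ofNat_of_zero_le hpre with ⟨n, rfl⟩
  cases n with
  | zero =>
    have h0 : ((0:Nat):Int) = 0 := rfl
    rw [h0]
    simp only [findComplement_str, findComplement_str_alt, Int.natAbs_zero, pyBitLength_zero]
    decide
  | succ m =>
    unfold findComplement_str findComplement_str_alt pyBin
    have hneg : ¬ ((m+1 : Nat) : Int) < 0 := by omega
    have hne : ((m+1 : Nat) : Int) ≠ 0 := by omega
    simp only [if_neg hneg, if_neg hne]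
    have habs : ((m+1 : Nat) : Int).natAbs = m+1 := Int.natAbs_natCast _
    rw [habs]
    have hdrop : (['0','b'] ++ binDigits (m+1)).drop 2 = binDigits (m+1) := by
      simp
    rw [hdrop, foldl_append_map, List.nil_append, fold_compl_binDigits]
    have hmax : max (pyBitLength (m+1)) 1 = pyBitLength (m+1) :=
      Nat.max_eq_left (pyBitLength_pos (m+1) (by omega))
    rw [hmax, int_shiftLeft_one]
    have hlt : m+1 < 2 ^ pyBitLength (m+1) := lt_two_pow_pyBitLength (m+1)
    have hxor := xor_ones (pyBitLength (m+1)) (m+1) hlt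
    have hcast : Int.xor ((m+1 : Nat) : Int) ((2:Int) ^ pyBitLength (m+1) - 1)
        = (((m+1) ^^^ (2 ^ pyBitLength (m+1) - 1) : Nat) : Int) := by
      have h1 : ((2:Int) ^ pyBitLength (m+1) - 1) = ((2 ^ pyBitLength (m+1) - 1 : Nat) : Int) := by
        push_cast [Nat.one_le_two_pow]
        ring
      rw [h1]
      rfl
    rw [hcast, hxor]
    have hle : m + 1 ≤ 2 ^ pyBitLength (m+1) - 1 := by omega
    rw [Nat.cast_sub hle, Nat.cast_sub Nat.one_le_two_pow]
    push_cast
    ring
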